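-- pv_equiv track=rewrite | github.com/carlymatson/advent-of-code | aoc/y2021/day10/main.py | score_autocomplete
-- ===== SOURCE A (Python) =====
-- def score_autocomplete(completion):
--     char_values = {
--         "(": 1,
--         "[": 2,
--         "{": 3,
--         "<": 4,
--     }
--     score = 0
--     for c in completion[::-1]:
--         score *= 5
--         score += char_values[c]
--     return score
-- ===== SOURCE B (Python) =====
-- def score_autocomplete(completion):
--     char_values = {
--         "(": 1,
--         "[": 2,
--         "{": 3,
--         "<": 4,
--     }
--     digits = [char_values[c] for c in completion]
--     return sum(d * 5 ** i for i, d in enumerate(digits))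
-- ===== Notes on version B (the rewrite author's own statement) =====
-- stated objective: alternative
-- what changed: Replaces the reversed-string Horner loop with two staged passes: first map the string to a list of digit values, then sum d * 5**i over the enumerated digits (forward positional weighting, no reversal, no running accumulator).
import Mathlib
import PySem

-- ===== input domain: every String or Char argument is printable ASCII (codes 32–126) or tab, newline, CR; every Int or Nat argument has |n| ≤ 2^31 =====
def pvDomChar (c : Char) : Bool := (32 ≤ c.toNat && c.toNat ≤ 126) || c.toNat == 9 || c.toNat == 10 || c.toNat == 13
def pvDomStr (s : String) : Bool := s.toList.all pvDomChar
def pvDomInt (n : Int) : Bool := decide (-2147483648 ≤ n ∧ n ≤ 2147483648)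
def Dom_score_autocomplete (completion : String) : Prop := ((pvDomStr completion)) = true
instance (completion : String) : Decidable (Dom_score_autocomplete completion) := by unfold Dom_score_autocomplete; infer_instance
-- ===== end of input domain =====

-- B replaces the reversed Horner loop by two staged passes (map to digit values,
-- then sum d * 5^i over the enumerated digits); return values agree on Pre_.

-- the dict literal char_values; none = KeyError (excluded by Pre_)
def charValues : Char → Option Int
  | '(' => some 1
  | '[' => some 2
  | '{' => some 3
  | '<' => some 4
  | _   => none

-- ===== PORT A =====
-- loop body: score *= 5; score += char_values[c]; Option threads the KeyError
def aStep (s : Option Int) (c : Char) : Option Int :=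
  match s with
  | none => none
  | some sc =>
    match charValues c with
    | some v => some (sc * 5 + v)
    | none => none

-- completion[::-1] is the reversed string; .getD 0 is never reached under Pre_
def score_autocomplete (completion : String) : Int :=
  (completion.toList.reverse.foldl aStep (some 0)).getD 0

-- ===== PORT B =====
-- pass 1: digits = [char_values[c] for c in completion]   (mapM threads the KeyError)
-- pass 2: sum(d * 5**i for i, d in enumerate(digits))
def score_autocomplete_alt (completion : String) : Int :=
  match completion.toList.mapM charValues with
  | none => 0
  | some digits => (digits.zipIdx.map (fun di => di.1 * 5 ^ di.2)).sum

-- ===== PRECONDITION & SPEC =====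
-- Pre_ excludes strings with a character that is not one of the four opening brackets, on which A raises KeyError
def Pre_score_autocomplete (completion : String) : Prop :=
  completion.toList.all (fun c => (charValues c).isSome) = true
instance (completion : String) : Decidable (Pre_score_autocomplete completion) := by
  unfold Pre_score_autocomplete; infer_instance

def pvWitness_score_autocomplete : String := "([{<(("

def Spec_score_autocomplete (completion : String) (out : Int) : Prop := out = score_autocomplete_alt completion
instance (completion : String) (out : Int) : Decidable (Spec_score_autocomplete completion out) := by unfold Spec_score_autocomplete; infer_instance

-- ===== CLAIM =====
def Claim_equal_score_autocomplete : Prop := ∀ (completion : String), Dom_score_autocomplete completion → Pre_score_autocomplete completion → Spec_score_autocomplete completion (score_autocomplete completion)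

-- ===== LEMMAS AND PROOFS =====

def cval (c : Char) : Int := (charValues c).getD 0

-- A's accumulation, option-free
def horner (s : Int) (l : List Char) : Int :=
  l.foldl (fun a c => a * 5 + cval c) s

lemma aStep_eq (l : List Char) (h : ∀ c ∈ l, (charValues c).isSome) (s : Int) :
    l.foldl aStep (some s) = some (horner s l) := by
  induction l generalizing s with
  | nil => simp [horner]
  | cons c l ih =>
    have hc : (charValues c).isSome := h c (by simp)
    cases hcv : charValues c with
    | none => simp [hcv] at hc
    | some v =>
      simp only [List.foldl_cons, aStep, hcv, horner, cval]
      rw [ih (fun c hcmem => h c (by simp [hcmem]))]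
      simp [horner, cval]

lemma horner_append (s : Int) (l : List Char) (c : Char) :
    horner s (l ++ [c]) = horner s l * 5 + cval c := by
  simp [horner]

lemma mapM_eq (l : List Char) (h : ∀ c ∈ l, (charValues c).isSome) :
    l.mapM charValues = some (l.map cval) := by
  induction l with
  | nil => simp
  | cons c l ih =>
    have hc : (charValues c).isSome := h c (by simp)
    cases hcv : charValues c with
    | none => simp [hcv] at hc
    | some v =>
      rw [List.mapM_cons, ih (fun c hcmem => h c (by simp [hcmem]))]
      simp [hcv, cval]

-- positional sum of the digit list
def posSum (ds : List Int) : Int :=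
  (ds.zipIdx.map (fun di => di.1 * 5 ^ di.2)).sum

lemma posSum_cons (d : Int) (ds : List Int) :
    posSum (d :: ds) = d + 5 * posSum ds := by
  unfold posSum
  rw [List.zipIdx_cons]
  simp only [List.map_cons, List.sum_cons, pow_zero, mul_one]
  have : ((ds.zipIdx (0 + 1)).map ((fun di => di.1 * 5 ^ di.2))).sum
      = 5 * ((ds.zipIdx).map (fun di => di.1 * 5 ^ di.2)).sum := by
    rw [List.zipIdx_succ, List.map_map, ← List.sum_map_mul_left]
    congr 1
    apply List.map_congr_left
    rintro ⟨d, i⟩ _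
    simp [pow_succ]
    ring
  rw [this]

-- A's reversed Horner equals B's positional sum
lemma horner_reverse_eq (l : List Char) :
    horner 0 l.reverse = posSum (l.map cval) := by
  induction l with
  | nil => simp [horner, posSum]
  | cons c l ih =>
    rw [List.reverse_cons, horner_append, List.map_cons, posSum_cons, ih]
    ring

-- ===== VERDICT =====
theorem score_autocomplete_spec : Claim_equal_score_autocomplete := by
  intro completion _ hpre
  unfold Spec_score_autocomplete score_autocomplete score_autocomplete_alt
  have hall : ∀ c ∈ completion.toList, (charValues c).isSome := by
    intro c hc
    exact (List.all_eq_true.mp hpre) c hc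
  have hrev : ∀ c ∈ completion.toList.reverse, (charValues c).isSome := by
    intro c hc; exact hall c (List.mem_reverse.mp hc)
  rw [aStep_eq _ hrev, mapM_eq _ hall]
  simpa [posSum] using horner_reverse_eq completion.toList
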